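-- pv_equiv track=rewrite | github.com/ZeriiX3/Tetris-Python-L1 | fonctions.py | grid_creation_triangle
-- ===== SOURCE A (Python) =====
-- def grid_creation_triangle(n):
--     grid_triangle = []
--     if n % 2 == 0:
--         n -= 1
--     for i in range(n):
--         k = []
--         for j in range(n):
--             k.append(0)
--         grid_triangle.append(k)
--     mid = len(grid_triangle) // 2
--     for i in range(n // 2 + 1):
--         for k in range(i + 1):
--             grid_triangle[i][mid - k] = 1
--             grid_triangle[i][mid + k] = 1
--     del grid_triangle[mid + 1:]
--     return grid_triangle
-- ===== SOURCE B (Python) =====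
-- def grid_creation_triangle(n):
--     m = n - 1 if n % 2 == 0 else n
--     if m <= 0:
--         return []
--     mid = m // 2
--     return [[1 if abs(j - mid) <= i else 0 for j in range(m)]
--             for i in range(mid + 1)]
-- ===== Notes on version B (the rewrite author's own statement) =====
-- stated objective: simpler
-- what changed: B replaces A's three phases (allocate a full n x n zero grid, fill it by symmetric offsets with nested index mutation, then delete the bottom half) with a single pass that directly produces only the kept rows via the per-column distance predicate abs(j-mid) <= i.
import Mathlib
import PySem

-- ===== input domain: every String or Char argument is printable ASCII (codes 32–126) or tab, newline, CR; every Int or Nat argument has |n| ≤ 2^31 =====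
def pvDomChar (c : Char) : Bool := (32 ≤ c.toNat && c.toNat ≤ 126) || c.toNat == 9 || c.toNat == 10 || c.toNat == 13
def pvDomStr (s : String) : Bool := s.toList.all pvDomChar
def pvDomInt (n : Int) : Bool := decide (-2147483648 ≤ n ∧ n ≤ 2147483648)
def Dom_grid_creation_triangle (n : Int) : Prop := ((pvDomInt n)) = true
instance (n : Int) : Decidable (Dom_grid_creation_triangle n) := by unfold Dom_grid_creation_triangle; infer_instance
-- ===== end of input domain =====

-- B builds exactly the kept rows in one pass with a per-column distance predicate instead of
-- A's allocate-full-grid / fill-by-symmetric-offsets / delete-bottom-half phases (objective: simpler).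

-- ===== PORT A =====
-- grid[i][j] = v : Python item assignment; whenever A's loop body runs, both indices
-- are in range and nonnegative (proved below), so the Nat conversion here is exact.
def pvSet2 (g : List (List Int)) (i j : Int) (v : Int) : List (List Int) :=
  g.modify i.toNat (fun row => row.set j.toNat v)

def grid_creation_triangle (n : Int) : List (List Int) :=
  let n1 := if PySem.Int.mod n 2 == 0 then n - 1 else n
  let grid := (PySem.List.pyRange 0 n1 1).foldl
      (fun g _ => g ++ [(PySem.List.pyRange 0 n1 1).foldl (fun k _ => k ++ [(0 : Int)]) []]) []
  let mid : Int := ((grid.length / 2 : Nat) : Int)   -- len(grid_triangle) // 2: length ≥ 0, so Nat division is Python's //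
  let grid := (PySem.List.pyRange 0 (PySem.Int.floordiv n1 2 + 1) 1).foldl
      (fun g i => (PySem.List.pyRange 0 (i + 1) 1).foldl
          (fun g k => pvSet2 (pvSet2 g i (mid - k) 1) i (mid + k) 1) g) grid
  PySem.List.slice grid none (some (mid + 1))   -- del grid_triangle[mid+1:] keeps grid_triangle[:mid+1]

-- ===== PORT B =====
def grid_creation_triangle_alt (n : Int) : List (List Int) :=
  let m := if PySem.Int.mod n 2 == 0 then n - 1 else n
  if m ≤ 0 then []
  else
    let mid := PySem.Int.floordiv m 2
    (PySem.List.pyRange 0 (mid + 1) 1).map (fun i =>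
      (PySem.List.pyRange 0 m 1).map (fun j => if |j - mid| ≤ i then 1 else 0))

-- ===== PRECONDITION & SPEC =====
def Spec_grid_creation_triangle (n : Int) (out : List (List Int)) : Prop := out = grid_creation_triangle_alt n
instance (n : Int) (out : List (List Int)) : Decidable (Spec_grid_creation_triangle n out) := by unfold Spec_grid_creation_triangle; infer_instance

-- ===== CLAIM (what is proved, stated in full; the proofs are below) =====
def Claim_equal_grid_creation_triangle : Prop := ∀ (n : Int), Dom_grid_creation_triangle n → Spec_grid_creation_triangle n (grid_creation_triangle n)

-- ===== LEMMAS AND PROOFS =====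

-- intermediate state of A's fill loops over the (2M+1)×(2M+1) zero grid:
-- rows r < t are fully filled to radius r; row t is filled to radius < s; rows r > t untouched
def pvCell (M t s r j : Nat) : Int :=
  if (r < t ∧ (j : Int) - M ≤ r ∧ (M : Int) - j ≤ r) ∨
     (r = t ∧ (j : Int) - M < s ∧ (M : Int) - j < s) then 1 else 0

def pvState (M t s : Nat) : List (List Int) :=
  (List.range (2*M+1)).map (fun r => (List.range (2*M+1)).map (fun j => pvCell M t s r j))

lemma pv_foldl_app {α β : Type} (l : List β) (x : α) (init : List α) :
    l.foldl (fun acc _ => acc ++ [x]) init = init ++ List.replicate l.length x := by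
  induction l generalizing init with
  | nil => simp
  | cons h t ih =>
    rw [List.length_cons, List.foldl_cons, ih, List.replicate_succ, List.append_assoc]
    rfl

lemma pv_set_map_range {α : Type} (N p : Nat) (f : Nat → α) (v : α) :
    ((List.range N).map f).set p v =
      (List.range N).map (fun j => if j = p then v else f j) := by
  apply List.ext_getElem
  · simp
  · intro i h1 h2
    simp only [List.length_set, List.length_map, List.length_range] at h1
    simp only [List.getElem_set, List.getElem_map, List.getElem_range]
    split_ifs with h3 h4 h4 <;> first | rfl | omega

lemma pv_modify_map_range {α : Type} (N p : Nat) (f : Nat → α) (g : α → α) :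
    ((List.range N).map f).modify p g =
      (List.range N).map (fun r => if r = p then g (f r) else f r) := by
  apply List.ext_getElem
  · simp
  · intro i h1 h2
    simp only [List.length_modify, List.length_map, List.length_range] at h1
    rw [List.getElem_modify]
    simp only [List.getElem_map, List.getElem_range]
    split_ifs with h3 h4 h4 <;> first | rfl | omega

lemma pv_state_step (M t k : Nat) (hk : k ≤ t) (ht : t ≤ M) :
    pvSet2 (pvSet2 (pvState M t k) (t : Int) ((M : Int) - k) 1) (t : Int) ((M : Int) + k) 1
      = pvState M t (k+1) := by
  have hmk : ((M : Int) - k).toNat = M - k := by omega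
  have hpk : ((M : Int) + k).toNat = M + k := by omega
  simp only [pvSet2, pvState, Int.toNat_natCast, hmk, hpk]
  rw [pv_modify_map_range, pv_modify_map_range]
  apply List.map_congr_left
  intro r hr
  simp only [List.mem_range] at hr
  by_cases hrt : r = t
  · subst hrt
    simp only [if_true]
    rw [pv_set_map_range, pv_set_map_range]
    apply List.map_congr_left
    intro j hj
    simp only [List.mem_range] at hj
    simp only [pvCell, lt_self_iff_false, false_and, false_or, true_and]
    split_ifs <;> omega
  · simp only [if_neg hrt]
    apply List.map_congr_left
    intro j hj
    simp only [List.mem_range] at hj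
    simp only [pvCell]
    split_ifs <;> omega

lemma pv_inner_fold (M t s : Nat) (hs : s ≤ t + 1) (ht : t ≤ M) :
    (PySem.List.pyRange 0 (s : Int) 1).foldl
        (fun g k => pvSet2 (pvSet2 g (t : Int) ((M : Int) - k) 1) (t : Int) ((M : Int) + k) 1)
        (pvState M t 0)
      = pvState M t s := by
  induction s with
  | zero => simp [PySem.List.pyRange_one_eq_nil]
  | succ s ih =>
    have h1 : ((s + 1 : Nat) : Int) = (s : Int) + 1 := by push_cast; ring
    rw [h1, PySem.List.pyRange_one_succ_right (by omega), List.foldl_append,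
      ih (by omega), List.foldl_cons, List.foldl_nil]
    exact pv_state_step M t s (by omega) ht

lemma pv_state_shift (M t : Nat) :
    pvState M t (t+1) = pvState M (t+1) 0 := by
  simp only [pvState]
  apply List.map_congr_left
  intro r hr
  apply List.map_congr_left
  intro j hj
  simp only [List.mem_range] at hr hj
  simp only [pvCell]
  split_ifs <;> omega

lemma pv_outer_fold (M t : Nat) (ht : t ≤ M + 1) :
    (PySem.List.pyRange 0 (t : Int) 1).foldl
        (fun g i => (PySem.List.pyRange 0 (i + 1) 1).foldl
            (fun g k => pvSet2 (pvSet2 g i ((M : Int) - k) 1) i ((M : Int) + k) 1) g)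
        (pvState M 0 0)
      = pvState M t 0 := by
  induction t with
  | zero => simp [PySem.List.pyRange_one_eq_nil]
  | succ t ih =>
    have h1 : ((t + 1 : Nat) : Int) = (t : Int) + 1 := by push_cast; ring
    rw [h1, PySem.List.pyRange_one_succ_right (by omega), List.foldl_append,
      ih (by omega), List.foldl_cons, List.foldl_nil]
    have h2 : ((t : Int) + 1) = ((t + 1 : Nat) : Int) := h1.symm
    rw [h2, pv_inner_fold M t (t+1) (by omega) (by omega), pv_state_shift]

lemma pv_zero_grid (M : Nat) (m : Int) (hM : m = 2 * (M : Int) + 1) :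
    (PySem.List.pyRange 0 m 1).foldl
        (fun g _ => g ++ [(PySem.List.pyRange 0 m 1).foldl (fun k _ => k ++ [(0 : Int)]) []]) []
      = pvState M 0 0 := by
  rw [pv_foldl_app, pv_foldl_app, PySem.List.length_pyRange_one]
  have hlen : (m - 0).toNat = 2*M+1 := by omega
  rw [hlen]
  simp only [List.nil_append]
  symm
  rw [List.eq_replicate_iff]
  refine ⟨by simp [pvState], ?_⟩
  intro row hrow
  simp only [pvState, List.mem_map, List.mem_range] at hrow
  obtain ⟨r, hr, hrw⟩ := hrow
  rw [← hrw, List.eq_replicate_iff]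
  refine ⟨by simp, ?_⟩
  intro x hx
  simp only [List.mem_map, List.mem_range] at hx
  obtain ⟨j, hj, hxx⟩ := hx
  rw [← hxx, pvCell, if_neg (by omega)]

-- ===== VERDICT (by name: the statement is the Claim_ definition above) =====
theorem grid_creation_triangle_spec : Claim_equal_grid_creation_triangle := by
  intro n _
  unfold Spec_grid_creation_triangle
  simp only [grid_creation_triangle, grid_creation_triangle_alt]
  set m : Int := if PySem.Int.mod n 2 == 0 then n - 1 else n with hm
  have hodd : m % 2 = 1 := by
    rw [hm]
    rcases Int.even_or_odd n with ⟨c, hc⟩ | ⟨c, hc⟩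
    · rw [if_pos (by
        simp only [PySem.Int.mod_eq_emod_of_pos (by omega : (0:Int) < 2), beq_iff_eq]
        omega)]
      omega
    · rw [if_neg (by
        simp only [PySem.Int.mod_eq_emod_of_pos (by omega : (0:Int) < 2), beq_iff_eq]
        omega)]
      omega
  by_cases hpos : m ≤ 0
  · -- adjusted n is odd and ≤ 0, hence ≤ -1: A builds no rows and fills nothing; both return []
    rw [if_pos hpos, PySem.List.pyRange_one_eq_nil hpos]
    have hfd : PySem.Int.floordiv m 2 + 1 ≤ 0 := by
      have h1 := PySem.Int.floordiv_mul_add_mod m 2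
      have h2 := PySem.Int.mod_nonneg m (by omega : (0:Int) < 2)
      have h3 := PySem.Int.mod_lt m (by omega : (0:Int) < 2)
      omega
    rw [PySem.List.pyRange_one_eq_nil hfd]
    simp [PySem.List.slice]
  · rw [if_neg hpos]
    replace hpos : 0 < m := by omega
    obtain ⟨M, hM⟩ : ∃ M : Nat, m = 2 * (M : Int) + 1 :=
      ⟨((m - 1) / 2).toNat, by omega⟩
    have hfd : PySem.Int.floordiv m 2 = (M : Int) := by
      rw [PySem.Int.floordiv_eq_ediv_of_pos (by omega : (0:Int) < 2)]
      omega
    rw [pv_zero_grid M m hM]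
    have hmid : (((pvState M 0 0).length / 2 : Nat) : Int) = (M : Int) := by
      simp only [pvState, List.length_map, List.length_range]
      omega
    rw [hmid, hfd]
    have h1 : ((M : Int) + 1) = ((M + 1 : Nat) : Int) := by push_cast; ring
    rw [h1, pv_outer_fold M (M+1) (by omega)]
    -- slice to the kept top half, and compare with B row by row
    rw [PySem.List.slice_to_natCast]
    simp only [pvState]
    rw [PySem.List.pyRange_one, PySem.List.pyRange_one]
    have h2 : (((M + 1 : Nat) : Int) - 0).toNat = M + 1 := by omega
    have h3 : (m - 0).toNat = 2*M+1 := by omega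
    rw [h2, h3, ← List.map_take, List.take_range, min_eq_left (by omega)]
    simp only [List.map_map]
    apply List.map_congr_left
    intro r hr
    simp only [List.mem_range] at hr
    simp only [Function.comp]
    apply List.map_congr_left
    intro j hj
    simp only [List.mem_range] at hj
    simp only [Function.comp_apply, pvCell, zero_add, abs_le]
    split_ifs <;> omega
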